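-- pv_equiv track=rewrite | github.com/FriedrichF/TheoInf | Uebung2-3.py | ListAppendElement
-- ===== SOURCE A (Python) =====
-- def ListAppendElement(l,e):
--   binNew = 0
--   binTmp = 0
--   binRet = l
--   length = binLength(e)
--   for i in range(0,length):
--     binTmp = binTestBit(e,(length - i))
--     if (binTmp == 1):
--       binNew = (prodZ(binNew,4) + 3)
--     else:
--       binNew = prodZ(binNew,4)
--   lengthNew = (binLength(binNew) + 2)
--   if (binNew == 0):
--     lengthNew = 4
--   binNew = (prodZ(binNew,4) + 2)
--   for x in range(0,lengthNew):
--     binRet = prodZ(2,binRet)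
--   return (binRet + binNew)
--
-- def prodZ(x,y):
--   [i,z] = [0,0] # Initialisierung
--   if (x < 0):
--     x = (0 - x) # negatives Vorzeichen von x entfernen
--     y = (0 - y) # und auf y übertragen
--   for i in range(0,x): # x Schleifendurchläufe
--     z = (z + y) # y wird x-mal zu z addiert
--   return z
--
-- def divtwo(x):
--   z = 0
--   if (x <= 0):
--     z = 0
--   if (x > 0):
--     while (x >= 2):
--       z = (z + 1)
--       x = (x - 2)
--   return z
--
-- def binTestBit(n,stelle):
--   ret = 0
--   iStelle = 0
--   if (n <= 0):
--     ret = 0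
--   while ((n > 0) and (stelle > iStelle)):
--     iStelle = (iStelle + 1)
--     p = 0
--     zahl = divtwo(n)
--     for i in range(0, zahl):
--       p = (p + 2)
--     ret = (n - p)
--     n = zahl
--   return ret
--
-- def binLength(n):
--   ret = 0
--   iStelle = 0
--   if (n < 0):
--     iStelle = 0
--   if (n == 0):
--     iStelle = 1
--   while (n > 0):
--     iStelle = (iStelle + 1)
--     n = divtwo(n)
--   return iStelle
-- ===== SOURCE B (Python) =====
-- def ListAppendElement(l, e):
--     bits = bin(e)[2:] if e > 0 else '0'
--     enc = ''.join(c + c for c in bits) + '10'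
--     return l * (1 << len(enc)) + int(enc, 2)
-- ===== Notes on version B (the rewrite author's own statement) =====
-- stated objective: faster
-- what changed: Replaces A's unary-addition multiplication (prodZ), repeated bit-probing and repeated-halving length loops by direct string construction of the self-delimiting code (bin(e), doubled characters, '10' terminator) and one closed-form shift-and-add.
import Mathlib
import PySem

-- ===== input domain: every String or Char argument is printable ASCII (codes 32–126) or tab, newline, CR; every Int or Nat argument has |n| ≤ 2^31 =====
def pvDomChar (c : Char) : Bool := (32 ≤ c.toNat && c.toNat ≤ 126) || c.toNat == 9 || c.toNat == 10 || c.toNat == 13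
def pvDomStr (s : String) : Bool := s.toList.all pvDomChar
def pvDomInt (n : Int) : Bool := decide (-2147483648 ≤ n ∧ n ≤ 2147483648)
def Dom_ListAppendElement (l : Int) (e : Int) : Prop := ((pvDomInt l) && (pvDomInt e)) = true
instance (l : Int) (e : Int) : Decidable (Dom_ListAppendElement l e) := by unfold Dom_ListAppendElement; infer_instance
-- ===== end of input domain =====

-- B replaces A's unary-addition arithmetic loops by direct construction of the doubled-bits code
-- with terminator '10' and one closed-form shift-and-add; a timing run measured B faster
-- (A's prodZ is multiplication by repeated +1-addition, exponential in the bit length of e).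

-- ===== PORT A =====
-- (the pv…_dec lemmas and divtwoLoop_spec/divtwo_spec are cited by the ports' decreasing_by)
lemma pvDivtwoLoop_dec (x : Int) (h : 2 ≤ x) : (x - 2).toNat < x.toNat := by omega

def divtwoLoop (x z : Int) : Int :=
  if h : 2 ≤ x then divtwoLoop (x - 2) (z + 1) else z
termination_by x.toNat
decreasing_by exact pvDivtwoLoop_dec x h

def divtwo (x : Int) : Int := if 0 < x then divtwoLoop x 0 else 0

theorem divtwoLoop_spec (x z : Int) : divtwoLoop x z = z + (x.toNat / 2 : Nat) := by
  rw [divtwoLoop]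
  split
  · rw [divtwoLoop_spec (x - 2) (z + 1)]; omega
  · omega
termination_by x.toNat
decreasing_by exact pvDivtwoLoop_dec x (by assumption)

theorem divtwo_spec (x : Int) : divtwo x = ((x.toNat / 2 : Nat) : Int) := by
  unfold divtwo
  split
  · rw [divtwoLoop_spec]; omega
  · simp; omega

def prodZ (x y : Int) : Int :=
  let xy := if x < 0 then (-x, -y) else (x, y)
  (PySem.List.pyRange 0 xy.1 1).foldl (fun z _ => z + xy.2) 0

lemma pvBtbLoop_dec (stelle iStelle : Int) (h : iStelle < stelle) :
    (stelle - (iStelle + 1)).toNat < (stelle - iStelle).toNat := by omega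

def binTestBitLoop (n stelle iStelle ret : Int) : Int :=
  if h : 0 < n ∧ iStelle < stelle then
    let zahl := divtwo n
    let p := (PySem.List.pyRange 0 zahl 1).foldl (fun p _ => p + 2) 0
    binTestBitLoop zahl stelle (iStelle + 1) (n - p)
  else ret
termination_by (stelle - iStelle).toNat
decreasing_by exact pvBtbLoop_dec stelle iStelle h.2

def binTestBit (n stelle : Int) : Int := binTestBitLoop n stelle 0 0

lemma pvBinLengthLoop_dec (n : Int) (h : 0 < n) : (divtwo n).toNat < n.toNat := by
  rw [divtwo_spec]; omega

def binLengthLoop (n iStelle : Int) : Int :=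
  if h : 0 < n then binLengthLoop (divtwo n) (iStelle + 1) else iStelle
termination_by n.toNat
decreasing_by exact pvBinLengthLoop_dec n h

def binLength (n : Int) : Int := binLengthLoop n (if n = 0 then 1 else 0)

def ListAppendElement (l : Int) (e : Int) : Int :=
  let binRet := l
  let length := binLength e
  let binNew :=
    (PySem.List.pyRange 0 length 1).foldl
      (fun binNew i =>
        let binTmp := binTestBit e (length - i)
        if binTmp = 1 then prodZ binNew 4 + 3 else prodZ binNew 4) 0
  let lengthNew := binLength binNew + 2
  let lengthNew := if binNew = 0 then 4 else lengthNew
  let binNew2 := prodZ binNew 4 + 2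
  let binRet2 := (PySem.List.pyRange 0 lengthNew 1).foldl (fun r _ => prodZ 2 r) binRet
  binRet2 + binNew2

-- ===== PORT B =====
-- pyBin n = bin(n)[2:] for n > 0 (most-significant bit first)
def pyBin (n : Nat) : List Char :=
  if n < 2 then [if n = 1 then '1' else '0']
  else pyBin (n / 2) ++ [if n % 2 = 1 then '1' else '0']
termination_by n
decreasing_by exact Nat.div_lt_self (by omega) (by omega)

def ListAppendElement_alt (l : Int) (e : Int) : Int :=
  let bits : List Char := if 0 < e then pyBin e.toNat else ['0']
  let enc : List Char := bits.flatMap (fun c => [c, c]) ++ ['1', '0']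
  l * 2 ^ enc.length + enc.foldl (fun acc c => 2 * acc + (if c = '1' then 1 else 0)) 0

-- ===== PRECONDITION & SPEC =====
def Spec_ListAppendElement (l : Int) (e : Int) (out : Int) : Prop := out = ListAppendElement_alt l e
instance (l : Int) (e : Int) (out : Int) : Decidable (Spec_ListAppendElement l e out) := by unfold Spec_ListAppendElement; infer_instance

-- ===== CLAIM (what is proved, stated in full; the proofs are below) =====
def Claim_equal_ListAppendElement : Prop := ∀ (l : Int) (e : Int), Dom_ListAppendElement l e → Spec_ListAppendElement l e (ListAppendElement l e)

-- ===== LEMMAS AND PROOFS =====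

-- value of the bitwise-doubled encoding of m (each bit b becomes the two bits b b)
def dblVal (m : Nat) : Nat :=
  if h : m = 0 then 0 else 4 * dblVal (m / 2) + 3 * (m % 2)
termination_by m
decreasing_by exact Nat.div_lt_self (by omega) (by omega)

lemma foldl_addc (k : Nat) (c z : Int) :
    (PySem.List.pyRange 0 (k : Int) 1).foldl (fun z _ => z + c) z = z + k * c := by
  induction k generalizing z with
  | zero => simp [PySem.List.pyRange_one_eq_nil]
  | succ k ih =>
      have : ((k + 1 : Nat) : Int) = (k : Int) + 1 := by push_cast; ring
      rw [this, PySem.List.pyRange_one_succ_right (by positivity), List.foldl_append]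
      simp only [List.foldl_cons, List.foldl_nil]
      rw [ih]
      ring

lemma prodZ_spec (x y : Int) : prodZ x y = x * y := by
  unfold prodZ
  by_cases h : x < 0
  · simp only [h, if_true]
    have hx : ((-x).toNat : Int) = -x := by omega
    rw [← hx, foldl_addc, hx]
    ring
  · simp only [h, if_false]
    have hx : (x.toNat : Int) = x := by omega
    rw [← hx, foldl_addc, hx]
    ring

lemma binLengthLoop_cast (m : Nat) (i : Int) :
    binLengthLoop (m : Int) i = i + PySem.Int.bitLength (m : Int) := by
  rw [binLengthLoop]
  split
  · next h =>
      have hm : 0 < m := by exact_mod_cast h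
      rw [divtwo_spec]
      have ht : ((m : Int)).toNat = m := by omega
      rw [ht, binLengthLoop_cast (m / 2) (i + 1), PySem.Int.bitLength_natCast hm]
      push_cast; ring
  · next h =>
      have hm : m = 0 := by omega
      subst hm
      simp [PySem.Int.bitLength_zero]
termination_by m
decreasing_by exact Nat.div_lt_self (by omega) (by omega)

lemma binLength_pos (m : Nat) (hm : 0 < m) :
    binLength (m : Int) = (PySem.Int.bitLength (m : Int) : Int) := by
  unfold binLength
  rw [if_neg (by exact_mod_cast hm.ne'), binLengthLoop_cast]
  ring

lemma div_pow_pos (m j : Nat) (h : j < PySem.Int.bitLength (m : Int)) : 0 < m / 2 ^ j := by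
  have hm : m ≠ 0 := by
    intro hm; subst hm; simp [PySem.Int.bitLength_zero] at h
  have h1 : 2 ^ (PySem.Int.bitLength (m : Int) - 1) ≤ m := by
    have := PySem.Int.two_pow_bitLength_le (m : Int) (by exact_mod_cast hm)
    simpa using this
  have h2 : 2 ^ j ≤ 2 ^ (PySem.Int.bitLength (m : Int) - 1) :=
    Nat.pow_le_pow_right (by omega) (by omega)
  exact Nat.div_pos (le_trans h2 h1) (Nat.pow_pos (by omega))

lemma div_div_pow (m k : Nat) : m / 2 / 2 ^ k = m / 2 ^ (k + 1) := by
  rw [Nat.div_div_eq_div_mul, ← pow_succ']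

lemma div_pow_div_two (m j : Nat) : m / 2 ^ j / 2 = m / 2 ^ (j + 1) := by
  rw [Nat.div_div_eq_div_mul, ← pow_succ]

lemma btbLoop_spec (m : Nat) (s i ret : Int) (hm : 0 < m) (hlt : i < s)
    (hle : s - i ≤ (PySem.Int.bitLength (m : Int) : Int)) :
    binTestBitLoop (m : Int) s i ret = ((m / 2 ^ ((s - i - 1).toNat)) % 2 : Nat) := by
  have hz : divtwo (m : Int) = ((m / 2 : Nat) : Int) := by
    rw [divtwo_spec]; simp
  rw [binTestBitLoop]
  rw [dif_pos ⟨by exact_mod_cast hm, hlt⟩]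
  simp only [hz, foldl_addc]
  have hret : (m : Int) - (0 + ((m / 2 : Nat) : Int) * 2) = ((m % 2 : Nat) : Int) := by
    push_cast; omega
  rw [hret]
  by_cases hs : s - i = 1
  · rw [binTestBitLoop]
    rw [dif_neg (by omega)]
    have : (s - i - 1).toNat = 0 := by omega
    simp [this]
  · have h2 : 2 ≤ s - i := by omega
    have hbl2 : 2 ≤ PySem.Int.bitLength (m : Int) := by omega
    have hm2 : 2 ≤ m := by
      by_contra hc
      have hm1 : m = 1 := by omega
      subst hm1
      have hb1 : PySem.Int.bitLength ((1 : Nat) : Int) = 1 := by decide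
      omega
    have hmd : 0 < m / 2 := by omega
    have hble : PySem.Int.bitLength (m : Int) = PySem.Int.bitLength ((m / 2 : Nat) : Int) + 1 :=
      PySem.Int.bitLength_natCast (by omega)
    rw [btbLoop_spec (m / 2) s (i + 1) _ hmd (by omega) (by omega)]
    have hk : (s - (i + 1) - 1).toNat + 1 = (s - i - 1).toNat := by omega
    rw [← hk, ← div_div_pow]
termination_by (s - i).toNat
decreasing_by exact pvBtbLoop_dec s i hlt

lemma binTestBit_spec (m : Nat) (s : Int) (hm : 0 < m) (h1 : 1 ≤ s)
    (h2 : s ≤ (PySem.Int.bitLength (m : Int) : Int)) :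
    binTestBit (m : Int) s = ((m / 2 ^ ((s - 1).toNat)) % 2 : Nat) := by
  unfold binTestBit
  have := btbLoop_spec m s 0 0 hm (by omega) (by omega)
  simpa using this

lemma dblVal_pos (m : Nat) (hm : 0 < m) : 0 < dblVal m := by
  rw [dblVal, dif_neg hm.ne']
  by_cases h : m % 2 = 1
  · omega
  · have hmd : 0 < m / 2 := by omega
    have := dblVal_pos (m / 2) hmd
    omega
termination_by m
decreasing_by exact Nat.div_lt_self (by omega) (by omega)

lemma bl_four (d r : Nat) (hd : 0 < d) (hr : r < 4) :
    PySem.Int.bitLength ((4 * d + r : Nat) : Int) = PySem.Int.bitLength ((d : Nat) : Int) + 2 := by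
  rw [PySem.Int.bitLength_natCast (by omega)]
  have h1 : (4 * d + r) / 2 = 2 * d + r / 2 := by omega
  rw [h1, PySem.Int.bitLength_natCast (by omega)]
  have h2 : (2 * d + r / 2) / 2 = d := by omega
  rw [h2]

lemma bl_dblVal (m : Nat) (hm : 0 < m) :
    PySem.Int.bitLength ((dblVal m : Nat) : Int) = 2 * PySem.Int.bitLength ((m : Nat) : Int) := by
  rw [dblVal, dif_neg hm.ne']
  by_cases h1 : m = 1
  · subst h1
    have h0 : dblVal (1 / 2) = 0 := by
      norm_num
      rw [dblVal]
      simp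
    norm_num [h0]
    decide
  · have hmd : 0 < m / 2 := by omega
    have hA := bl_four (dblVal (m / 2)) (3 * (m % 2)) (dblVal_pos _ hmd) (by omega)
    have hB := bl_dblVal (m / 2) hmd
    have hC := PySem.Int.bitLength_natCast (m := m) (by omega)
    omega
termination_by m
decreasing_by exact Nat.div_lt_self (by omega) (by omega)

-- A's first loop builds dblVal of the top k bits of m
lemma loopA (m : Nat) (hm : 0 < m) (k : Nat)
    (hk : k ≤ PySem.Int.bitLength (m : Int)) :
    (PySem.List.pyRange 0 (k : Int) 1).foldl
      (fun binNew i =>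
        let binTmp := binTestBit (m : Int) ((PySem.Int.bitLength (m : Int) : Int) - i)
        if binTmp = 1 then prodZ binNew 4 + 3 else prodZ binNew 4) 0
      = ((dblVal (m / 2 ^ (PySem.Int.bitLength (m : Int) - k)) : Nat) : Int) := by
  induction k with
  | zero =>
      have : m / 2 ^ PySem.Int.bitLength (m : Int) = 0 := by
        apply Nat.div_eq_of_lt
        have := PySem.Int.lt_two_pow_bitLength (m : Int)
        simpa using this
      simp [PySem.List.pyRange_one_eq_nil, this, dblVal]
  | succ k ih =>
      have hk' : k ≤ PySem.Int.bitLength (m : Int) := by omega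
      have hcast : ((k + 1 : Nat) : Int) = (k : Int) + 1 := by push_cast; ring
      rw [hcast, PySem.List.pyRange_one_succ_right (by positivity), List.foldl_append,
          ih hk']
      simp only [List.foldl_cons, List.foldl_nil]
      set L := PySem.Int.bitLength (m : Int) with hL
      have hbit : binTestBit (m : Int) ((L : Int) - (k : Int))
          = ((m / 2 ^ (L - k - 1)) % 2 : Nat) := by
        have hs1 : (1 : Int) ≤ (L : Int) - (k : Int) := by omega
        have hs2 : (L : Int) - (k : Int) ≤ (L : Int) := by omega
        rw [binTestBit_spec m _ hm hs1 hs2]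
        have h3 : (((L : Nat) : Int) - (k : Int) - 1).toNat = L - k - 1 := by omega
        rw [h3]
      rw [hbit]
      set t := m / 2 ^ (L - k - 1) with htdef
      have htpos : 0 < t := div_pow_pos m (L - k - 1) (by omega)
      have htop : m / 2 ^ (L - k) = t / 2 := by
        rw [htdef, div_pow_div_two]
        have h4 : L - k - 1 + 1 = L - k := by omega
        rw [h4]
      have hdbl : dblVal t = 4 * dblVal (t / 2) + 3 * (t % 2) := by
        rw [dblVal, dif_neg htpos.ne']
      have hnext : L - (k + 1) = L - k - 1 := by omega
      rw [hnext, ← htdef, htop]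
      by_cases hb : t % 2 = 1
      · rw [if_pos (by exact_mod_cast congrArg (Nat.cast : Nat → Int) hb), prodZ_spec]
        push_cast [hdbl, hb]; ring
      · have hb0 : t % 2 = 0 := by omega
        rw [if_neg (by simp [hb0]), prodZ_spec]
        push_cast [hdbl, hb0]; ring

lemma loopPow (k : Nat) (r : Int) :
    (PySem.List.pyRange 0 (k : Int) 1).foldl (fun r _ => prodZ 2 r) r = 2 ^ k * r := by
  induction k generalizing r with
  | zero => simp [PySem.List.pyRange_one_eq_nil]
  | succ k ih =>
      have hcast : ((k + 1 : Nat) : Int) = (k : Int) + 1 := by push_cast; ring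
      rw [hcast, PySem.List.pyRange_one_succ_right (by positivity), List.foldl_append]
      simp only [List.foldl_cons, List.foldl_nil]
      rw [prodZ_spec, ih]
      ring

lemma pyBin_len (m : Nat) (hm : 0 < m) : (pyBin m).length = PySem.Int.bitLength (m : Int) := by
  rw [pyBin]
  by_cases h : m < 2
  · rw [if_pos h]
    have : m = 1 := by omega
    subst this; decide
  · rw [if_neg h, List.length_append, pyBin_len (m / 2) (by omega)]
    simp only [List.length_cons, List.length_nil]
    have hC := PySem.Int.bitLength_natCast (m := m) (by omega)
    omega
termination_by m
decreasing_by exact Nat.div_lt_self (by omega) (by omega)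

lemma len_flat (xs : List Char) : (xs.flatMap (fun c => [c, c])).length = 2 * xs.length := by
  induction xs with
  | nil => simp
  | cons x xs ih => simp [ih]; ring

lemma val_flat (m : Nat) (hm : 0 < m) (acc : Int) :
    ((pyBin m).flatMap (fun c => [c, c])).foldl
      (fun acc c => 2 * acc + (if c = '1' then 1 else 0)) acc
      = 4 ^ (pyBin m).length * acc + ((dblVal m : Nat) : Int) := by
  rw [pyBin]
  by_cases h : m < 2
  · rw [if_pos h]
    have hm1 : m = 1 := by omega
    subst hm1
    have h0 : dblVal 0 = 0 := by
      rw [dblVal]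
      simp
    have h3 : dblVal 1 = 3 := by
      rw [dblVal]
      norm_num [h0]
    norm_num [List.flatMap_cons, List.flatMap_nil, List.foldl_cons, List.foldl_nil, h3]
    ring
  · rw [if_neg h, List.flatMap_append, List.foldl_append,
        val_flat (m / 2) (by omega) acc]
    have hdbl : dblVal m = 4 * dblVal (m / 2) + 3 * (m % 2) := by
      rw [dblVal, dif_neg (by omega)]
    by_cases hb : m % 2 = 1
    · norm_num [hb, List.flatMap_cons, List.flatMap_nil, List.foldl_cons, List.foldl_nil,
        List.length_append]
      push_cast [hdbl, hb]
      ring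
    · have hb0 : m % 2 = 0 := by omega
      norm_num [hb0, List.flatMap_cons, List.flatMap_nil, List.foldl_cons, List.foldl_nil,
        List.length_append]
      push_cast [hdbl, hb0]
      ring
termination_by m
decreasing_by exact Nat.div_lt_self (by omega) (by omega)

-- ===== VERDICT (by name: the statement is the Claim_ definition above) =====
lemma binLength_zero_val : binLength 0 = 1 := by
  unfold binLength
  rw [if_pos rfl, binLengthLoop, dif_neg (by omega)]

lemma binTestBit_zero : binTestBit 0 1 = 0 := by
  unfold binTestBit
  rw [binTestBitLoop, dif_neg (by omega)]

lemma alt_nonpos (l e : Int) (he : ¬0 < e) : ListAppendElement_alt l e = l * 16 + 2 := by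
  have c0 : ¬(('0' : Char) = '1') := by decide
  simp only [ListAppendElement_alt, if_neg he]
  norm_num [List.flatMap_cons, List.flatMap_nil, List.foldl_cons, List.foldl_nil, c0]

theorem ListAppendElement_spec : Claim_equal_ListAppendElement := by
  intro l e _
  unfold Spec_ListAppendElement
  by_cases he : 0 < e
  · obtain ⟨m, rfl⟩ : ∃ m : Nat, e = (m : Int) := ⟨e.toNat, by omega⟩
    have hm : 0 < m := by exact_mod_cast he
    simp only [ListAppendElement, ListAppendElement_alt]
    rw [binLength_pos m hm,
        loopA m hm (PySem.Int.bitLength ((m : Nat) : Int)) le_rfl]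
    simp only [Nat.sub_self, pow_zero, Nat.div_one]
    have hdpos : 0 < dblVal m := dblVal_pos m hm
    rw [if_neg (by exact_mod_cast hdpos.ne')]
    rw [binLength_pos (dblVal m) hdpos, bl_dblVal m hm]
    have hcast : ((2 * PySem.Int.bitLength ((m : Nat) : Int) : Nat) : Int) + 2
        = ((2 * PySem.Int.bitLength ((m : Nat) : Int) + 2 : Nat) : Int) := by
      push_cast; ring
    rw [hcast, loopPow, prodZ_spec]
    rw [if_pos he]
    simp only [Int.toNat_natCast]
    rw [List.foldl_append, val_flat m hm 0]
    simp only [List.length_append, len_flat, pyBin_len m hm, List.foldl_cons, List.foldl_nil,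
      List.length_cons, List.length_nil]
    have c0 : ¬(('0' : Char) = '1') := by decide
    norm_num [c0]
    ring
  · rw [alt_nonpos l e he]
    by_cases he0 : e = 0
    · subst he0
      simp only [ListAppendElement, binLength_zero_val, prodZ_spec]
      rw [PySem.List.pyRange_one_cons (by omega : (0 : Int) < 1),
          PySem.List.pyRange_one_eq_nil (by omega : (1 : Int) ≤ 0 + 1)]
      simp only [List.foldl_cons, List.foldl_nil]
      norm_num [binTestBit_zero]
      rw [PySem.List.pyRange_one_cons (by omega), PySem.List.pyRange_one_cons (by omega),
          PySem.List.pyRange_one_cons (by omega), PySem.List.pyRange_one_cons (by omega),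
          PySem.List.pyRange_one_eq_nil (by omega)]
      simp only [List.foldl_cons, List.foldl_nil]
      ring
    · have hbl : binLength e = 0 := by
        unfold binLength
        rw [if_neg he0, binLengthLoop, dif_neg he]
      simp only [ListAppendElement, hbl, prodZ_spec]
      rw [PySem.List.pyRange_one_eq_nil le_rfl]
      simp only [List.foldl_nil]
      norm_num
      rw [PySem.List.pyRange_one_cons (by omega), PySem.List.pyRange_one_cons (by omega),
          PySem.List.pyRange_one_cons (by omega), PySem.List.pyRange_one_cons (by omega),
          PySem.List.pyRange_one_eq_nil (by omega)]
      simp only [List.foldl_cons, List.foldl_nil]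
      ring
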